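-- pv_equiv track=rewrite | github.com/JeffreyAsuncion/cs-guided-project-problem-solving | src/demonstration_04.py | emotify
-- ===== SOURCE A (Python) =====
-- def emotify(txt):
--     # Your code here
--     # make a dict
--
--     data = {
--         "smile": ":)",
--         "grin" : ":D",
--         "sad"  : ":(",
--         "mad"  : ":P"
--     }
--
--     for k, v in data.items():
--          txt = txt.replace(k,v)
--
--     return txt
-- ===== SOURCE B (Python) =====
-- def emotify(txt):
--     # Single left-to-right pass: at each position try the keys in dict order,
--     # emit the emoticon (and skip the word) on a match, else copy one character.
--     keys = (("smile", ":)"), ("grin", ":D"), ("sad", ":("), ("mad", ":P"))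
--     out = []
--     i = 0
--     n = len(txt)
--     while i < n:
--         for k, v in keys:
--             if txt.startswith(k, i):
--                 out.append(v)
--                 i += len(k)
--                 break
--         else:
--             out.append(txt[i])
--             i += 1
--     return "".join(out)
-- ===== Notes on version B (the rewrite author's own statement) =====
-- stated objective: alternative
-- what changed: Replaces the four sequential full-text str.replace scans (each rebuilding the whole string) with one left-to-right pass that tries the four keys at each position and builds the output once; asymptotically one pass instead of four, though CPython's C-level str.replace is faster in wall-clock time.
import Mathlib
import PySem

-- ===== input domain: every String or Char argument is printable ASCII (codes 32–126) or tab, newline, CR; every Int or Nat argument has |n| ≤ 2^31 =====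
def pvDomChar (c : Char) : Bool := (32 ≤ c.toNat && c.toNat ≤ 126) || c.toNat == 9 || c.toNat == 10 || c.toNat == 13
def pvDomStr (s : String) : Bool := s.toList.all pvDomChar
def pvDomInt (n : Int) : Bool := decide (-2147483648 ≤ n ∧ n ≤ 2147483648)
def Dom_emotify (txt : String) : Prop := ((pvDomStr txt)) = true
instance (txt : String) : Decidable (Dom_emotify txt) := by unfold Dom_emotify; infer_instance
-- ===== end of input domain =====

-- B replaces A's four sequential full-text str.replace passes with one left-to-right
-- pass that tries the four keys at each position and builds the output once.

-- ===== PORT A =====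
-- A builds a dict and folds txt.replace over its items, exactly as the Python loop does.
def emotify (txt : String) : String :=
  let data : PySem.Dict String String :=
    PySem.Dict.ofList [("smile", ":)"), ("grin", ":D"), ("sad", ":("), ("mad", ":P")]
  data.items.foldl (fun t kv => PySem.Str.replace t kv.1 kv.2) txt

-- ===== PORT B =====
-- B's single pass over the characters (the while-loop of Source B): try the keys in dict
-- order at the current position; on a match emit the emoticon and skip the word,
-- else copy one character and advance by one.
def emotifyScan : List Char → List Char
  | [] => []
  | c :: t =>
    if "smile".toList.isPrefixOf (c :: t) then ":)".toList ++ emotifyScan (t.drop 4)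
    else if "grin".toList.isPrefixOf (c :: t) then ":D".toList ++ emotifyScan (t.drop 3)
    else if "sad".toList.isPrefixOf (c :: t) then ":(".toList ++ emotifyScan (t.drop 2)
    else if "mad".toList.isPrefixOf (c :: t) then ":P".toList ++ emotifyScan (t.drop 2)
    else c :: emotifyScan t
termination_by l => l.length
decreasing_by all_goals (simp; try omega)

def emotify_alt (txt : String) : String := String.ofList (emotifyScan txt.toList)

-- ===== PRECONDITION & SPEC =====
def Spec_emotify (txt : String) (out : String) : Prop := out = emotify_alt txt
instance (txt : String) (out : String) : Decidable (Spec_emotify txt out) := by unfold Spec_emotify; infer_instance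

-- ===== CLAIM (what is proved, stated in full; the proofs are below) =====
def Claim_equal_emotify : Prop := ∀ (txt : String), Dom_emotify txt → Spec_emotify txt (emotify txt)

-- ===== LEMMAS AND PROOFS =====

-- Clean structural recursion computing Python's str.replace for a nonempty pattern.
def repW (old new : List Char) : List Char → List Char
  | [] => []
  | c :: t =>
    if old.isPrefixOf (c :: t) then new ++ repW old new (t.drop (old.length - 1))
    else c :: repW old new t
termination_by l => l.length
decreasing_by all_goals (simp; try omega)

theorem repW_go_eq (old new : List Char) (h : old ≠ []) :
    ∀ (fuel : Nat) (l acc : List Char), l.length ≤ fuel →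
      PySem.Chars.replace.go old new fuel l acc = acc.reverse ++ repW old new l := by
  intro fuel
  induction fuel with
  | zero =>
    intro l acc hl
    have hnil : l = [] := List.eq_nil_of_length_eq_zero (Nat.le_zero.mp hl)
    subst hnil
    simp [PySem.Chars.replace.go, repW]
  | succ n ih =>
    intro l acc hl
    cases l with
    | nil => simp [PySem.Chars.replace.go, repW]
    | cons c t =>
      by_cases hp : old.isPrefixOf (c :: t) = true
      · have hdrop : List.drop old.length (c :: t) = t.drop (old.length - 1) := by
          cases old with
          | nil => exact absurd rfl h
          | cons a b => simp
        rw [PySem.Chars.replace.go, if_pos hp, hdrop,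
            ih (t.drop (old.length - 1)) (new.reverse ++ acc)
              (by simp at hl ⊢; omega)]
        rw [repW, if_pos hp]
        simp
      · rw [PySem.Chars.replace.go, if_neg hp,
            ih t (c :: acc) (by simp at hl; omega)]
        rw [repW, if_neg hp]
        simp

theorem replace_eq_repW (old new l : List Char) (h : old ≠ []) :
    PySem.Chars.replace l old new = repW old new l := by
  rw [PySem.Chars.replace, if_neg (by simpa using h)]
  simpa using repW_go_eq old new h l.length l [] le_rfl

-- A word avoiding the replacement's first character is a prefix of repW's output
-- only if it was already a prefix of the input.
theorem prefix_of_repW (old : List Char) (nh : Char) (nt : List Char) :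
    ∀ l (w : List Char), nh ∉ w → w <+: repW old (nh :: nt) l → w <+: l := by
  intro l
  induction l using repW.induct old with
  | case1 => intro w hw hpre; rw [repW] at hpre; simpa using hpre
  | case2 c t hp ih =>
    intro w hw hpre
    rw [repW, if_pos hp] at hpre
    cases w with
    | nil => exact List.nil_prefix
    | cons a w' =>
      exfalso
      have : a = nh := (List.cons_prefix_cons.mp hpre).1
      exact hw (by simp [this])
  | case3 c t hp ih =>
    intro w hw hpre
    rw [repW, if_neg hp] at hpre
    cases w with
    | nil => exact List.nil_prefix
    | cons a w' =>
      obtain ⟨rfl, hs⟩ := List.cons_prefix_cons.mp hpre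
      exact List.cons_prefix_cons.mpr ⟨rfl, ih w' (fun hm => hw (List.mem_cons_of_mem _ hm)) hs⟩

-- Main invariant: the four sequential replaces equal the single pass.
theorem four_eq_scan : ∀ l : List Char,
    repW "mad".toList ":P".toList (repW "sad".toList ":(".toList
      (repW "grin".toList ":D".toList (repW "smile".toList ":)".toList l))) = emotifyScan l := by
  intro l
  induction l using emotifyScan.induct with
  | case1 => simp [repW, emotifyScan]
  | case2 c t h1 ih =>
    obtain ⟨s, hs⟩ := List.isPrefixOf_iff_prefix.mp h1
    have hc : c = 's' ∧ t = 'm'::'i'::'l'::'e'::s := by simpa using hs.symm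
    obtain ⟨rfl, rfl⟩ := hc
    rw [emotifyScan, if_pos h1]
    simp only [List.drop_succ_cons, List.drop_zero]
    simp [repW, List.isPrefixOf]
    simpa using ih
  | case3 c t h1 h2 ih =>
    obtain ⟨s, hs⟩ := List.isPrefixOf_iff_prefix.mp h2
    have hc : c = 'g' ∧ t = 'r'::'i'::'n'::s := by simpa using hs.symm
    obtain ⟨rfl, rfl⟩ := hc
    rw [emotifyScan, if_neg h1, if_pos h2]
    simp only [List.drop_succ_cons, List.drop_zero]
    simp [repW, List.isPrefixOf]
    simpa using ih
  | case4 c t h1 h2 h3 ih =>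
    obtain ⟨s, hs⟩ := List.isPrefixOf_iff_prefix.mp h3
    have hc : c = 's' ∧ t = 'a'::'d'::s := by simpa using hs.symm
    obtain ⟨rfl, rfl⟩ := hc
    rw [emotifyScan, if_neg h1, if_neg h2, if_pos h3]
    simp only [List.drop_succ_cons, List.drop_zero]
    rw [repW, if_neg h1]
    simp [repW, List.isPrefixOf]
    simpa using ih
  | case5 c t h1 h2 h3 h4 ih =>
    obtain ⟨s, hs⟩ := List.isPrefixOf_iff_prefix.mp h4
    have hc : c = 'm' ∧ t = 'a'::'d'::s := by simpa using hs.symm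
    obtain ⟨rfl, rfl⟩ := hc
    rw [emotifyScan, if_neg h1, if_neg h2, if_neg h3, if_pos h4]
    simp only [List.drop_succ_cons, List.drop_zero]
    simp [repW, List.isPrefixOf]
    simpa using ih
  | case6 c t h1 h2 h3 h4 ih =>
    rw [emotifyScan, if_neg h1, if_neg h2, if_neg h3, if_neg h4]
    have e1 : repW "smile".toList ":)".toList (c::t) = c :: repW "smile".toList ":)".toList t := by
      rw [repW, if_neg h1]
    have q2 : ¬ ("grin".toList.isPrefixOf (c :: repW "smile".toList ":)".toList t) = true) := by
      intro hb
      rw [← e1] at hb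
      exact h2 (List.isPrefixOf_iff_prefix.mpr
        (prefix_of_repW "smile".toList ':' [')'] _ _ (by decide)
          (List.isPrefixOf_iff_prefix.mp hb)))
    have e2 : repW "grin".toList ":D".toList (c :: repW "smile".toList ":)".toList t)
        = c :: repW "grin".toList ":D".toList (repW "smile".toList ":)".toList t) := by
      rw [repW, if_neg q2]
    have q3 : ¬ ("sad".toList.isPrefixOf
        (c :: repW "grin".toList ":D".toList (repW "smile".toList ":)".toList t)) = true) := by
      intro hb
      rw [← e2, ← e1] at hb
      exact h3 (List.isPrefixOf_iff_prefix.mpr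
        (prefix_of_repW "smile".toList ':' [')'] _ _ (by decide)
          (prefix_of_repW "grin".toList ':' ['D'] _ _ (by decide)
            (List.isPrefixOf_iff_prefix.mp hb))))
    have e3 : repW "sad".toList ":(".toList
          (c :: repW "grin".toList ":D".toList (repW "smile".toList ":)".toList t))
        = c :: repW "sad".toList ":(".toList
            (repW "grin".toList ":D".toList (repW "smile".toList ":)".toList t)) := by
      rw [repW, if_neg q3]
    have q4 : ¬ ("mad".toList.isPrefixOf (c :: repW "sad".toList ":(".toList
        (repW "grin".toList ":D".toList (repW "smile".toList ":)".toList t))) = true) := by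
      intro hb
      rw [← e3, ← e2, ← e1] at hb
      exact h4 (List.isPrefixOf_iff_prefix.mpr
        (prefix_of_repW "smile".toList ':' [')'] _ _ (by decide)
          (prefix_of_repW "grin".toList ':' ['D'] _ _ (by decide)
            (prefix_of_repW "sad".toList ':' ['('] _ _ (by decide)
              (List.isPrefixOf_iff_prefix.mp hb)))))
    rw [e1, e2, e3, repW, if_neg q4, ih]

-- ===== VERDICT (by name: the statement is the Claim_ definition above) =====
theorem emotify_spec : Claim_equal_emotify := by
  intro txt _
  unfold Spec_emotify
  have hitems : (PySem.Dict.ofList [("smile", ":)"), ("grin", ":D"), ("sad", ":("), ("mad", ":P")]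
      : PySem.Dict String String).items
      = [("smile", ":)"), ("grin", ":D"), ("sad", ":("), ("mad", ":P")] := by decide
  have hA : emotify txt = PySem.Str.replace (PySem.Str.replace (PySem.Str.replace
      (PySem.Str.replace txt "smile" ":)") "grin" ":D") "sad" ":(") "mad" ":P" := by
    rw [emotify]
    rw [hitems]
    rfl
  apply String.toList_inj.mp
  rw [hA]
  simp only [PySem.Str.toList_replace, emotify_alt]
  rw [replace_eq_repW _ _ _ (by decide), replace_eq_repW _ _ _ (by decide),
      replace_eq_repW _ _ _ (by decide), replace_eq_repW _ _ _ (by decide)]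
  rw [four_eq_scan]
  exact String.toList_ofList.symm
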